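-- pv_equiv track=rewrite | github.com/DavidJBoardman/ai-vault-dashboard | backend/routers/project.py | _strip_boss_stone_prefix
-- ===== SOURCE A (Python) =====
-- def _strip_boss_stone_prefix(label: str) -> str:
--     """Strip leading 'boss stone' variants for cleaner display labels."""
--     if not label:
--         return label
--
--     text = str(label).strip()
--     lowered = text.lower()
--
--     prefixes = (
--         "boss stone",
--         "boss_stone",
--         "boss-stone",
--     )
--
--     for prefix in prefixes:
--         if lowered.startswith(prefix):
--             stripped = text[len(prefix):].lstrip(" _-:#")
--             return stripped or text
--
--     return text
-- ===== SOURCE B (Python) =====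
-- def _strip_boss_stone_prefix(label: str) -> str:
--     """Strip a leading 'boss stone' variant (space/underscore/hyphen separator)."""
--     if not label:
--         return label
--
--     text = label.strip()
--     head = text.lower()[:10]
--
--     if head[:4] == "boss" and head[4:5] in " _-" and head[5:] == "stone":
--         rest = text[10:].lstrip(" _-:#")
--         return rest or text
--
--     return text
-- ===== Notes on version B (the rewrite author's own statement) =====
-- stated objective: simpler
-- what changed: The loop over a tuple of three explicit 10-character prefixes (startswith for each, slicing by len(prefix)) is replaced by one structural test on the first ten lowered characters: the 4-letter word, then a single separator character from the 3-char separator set, then the 5-letter word, followed by one fixed slice at index 10.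
import Mathlib
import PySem

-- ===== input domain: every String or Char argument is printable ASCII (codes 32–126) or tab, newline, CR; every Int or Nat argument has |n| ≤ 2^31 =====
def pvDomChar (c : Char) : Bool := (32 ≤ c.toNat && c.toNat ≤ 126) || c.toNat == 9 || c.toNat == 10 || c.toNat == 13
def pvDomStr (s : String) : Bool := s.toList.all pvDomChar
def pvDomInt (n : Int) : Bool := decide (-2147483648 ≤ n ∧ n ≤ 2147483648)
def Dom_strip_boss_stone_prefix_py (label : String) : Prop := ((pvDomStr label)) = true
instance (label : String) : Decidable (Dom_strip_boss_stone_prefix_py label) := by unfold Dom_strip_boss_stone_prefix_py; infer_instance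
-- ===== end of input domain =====

-- B replaces A's loop over a tuple of three explicit 10-character prefixes by a single
-- structural test on the first ten characters ("boss" + one of ' ','_','-' + "stone"); objective: simpler.


-- shared hand port of Python's str.lstrip(" _-:#") (PySem has no left-only chars strip):
-- exact — lstrip(chars) removes precisely the longest leading run of those characters
def pvLstripSep (cs : List Char) : List Char :=
  cs.dropWhile (fun c => c == ' ' || c == '_' || c == '-' || c == ':' || c == '#')

-- ===== PORT A =====
-- the 'for prefix in prefixes' loop, early return at the first matching prefix
def pvLoopA (text lowered : List Char) : List (List Char) → List Char
  | [] => text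
  | p :: ps =>
    if PySem.Chars.startswith lowered p then
      let stripped := pvLstripSep (PySem.Chars.slice text (some (PySem.Chars.len p)) none)
      if stripped = [] then text else stripped
    else pvLoopA text lowered ps

def strip_boss_stone_prefix_py (label : String) : String :=
  if label = "" then label
  else
    let text := PySem.Chars.strip label.toList
    let lowered := PySem.Chars.lower text
    String.ofList (pvLoopA text lowered
      ["boss stone".toList, "boss_stone".toList, "boss-stone".toList])

-- ===== PORT B =====
def strip_boss_stone_prefix_py_alt (label : String) : String :=
  if label = "" then label
  else
    let text := PySem.Chars.strip label.toList
    let head := PySem.Chars.slice (PySem.Chars.lower text) none (some 10)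
    if PySem.Chars.slice head none (some 4) = "boss".toList
        ∧ PySem.Chars.isIn (PySem.Chars.slice head (some 4) (some 5)) " _-".toList = true
        ∧ PySem.Chars.slice head (some 5) none = "stone".toList then
      let rest := pvLstripSep (PySem.Chars.slice text (some 10) none)
      String.ofList (if rest = [] then text else rest)
    else String.ofList text

-- ===== PRECONDITION & SPEC =====
def Spec_strip_boss_stone_prefix_py (label : String) (out : String) : Prop := out = strip_boss_stone_prefix_py_alt label
instance (label : String) (out : String) : Decidable (Spec_strip_boss_stone_prefix_py label out) := by unfold Spec_strip_boss_stone_prefix_py; infer_instance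

-- ===== CLAIM (what is proved, stated in full; the proofs are below) =====
def Claim_equal_strip_boss_stone_prefix_py : Prop := ∀ (label : String), Dom_strip_boss_stone_prefix_py label → Spec_strip_boss_stone_prefix_py label (strip_boss_stone_prefix_py label)

-- ===== LEMMAS AND PROOFS =====

lemma pv_singleton_infix {c : Char} {l : List Char} : [c] <:+: l ↔ c ∈ l := by
  constructor
  · intro h; exact List.singleton_sublist.mp h.sublist
  · intro h
    obtain ⟨s, t, rfl⟩ := List.append_of_mem h
    exact ⟨s, t, by simp⟩

lemma pv_slice_to10 (xs : List Char) : PySem.Chars.slice xs none (some 10) = xs.take 10 := by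
  rw [PySem.Chars.slice_eq_listSlice, PySem.List.slice_to xs (by norm_num),
    show Int.toNat 10 = 10 from rfl]

lemma pv_slice_to4 (xs : List Char) : PySem.Chars.slice xs none (some 4) = xs.take 4 := by
  rw [PySem.Chars.slice_eq_listSlice, PySem.List.slice_to xs (by norm_num),
    show Int.toNat 4 = 4 from rfl]

lemma pv_slice45 (xs : List Char) : PySem.Chars.slice xs (some 4) (some 5) = (xs.drop 4).take 1 := by
  rw [PySem.Chars.slice_eq_listSlice]
  have := PySem.List.slice_natCast xs 4 5
  norm_num at this; rw [this]

lemma pv_slice_from5 (xs : List Char) : PySem.Chars.slice xs (some 5) none = xs.drop 5 := by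
  rw [PySem.Chars.slice_eq_listSlice, PySem.List.slice_from xs (by norm_num),
    show Int.toNat 5 = 5 from rfl]

lemma pv_slice_from10 (xs : List Char) : PySem.Chars.slice xs (some 10) none = xs.drop 10 := by
  rw [PySem.Chars.slice_eq_listSlice, PySem.List.slice_from xs (by norm_num),
    show Int.toNat 10 = 10 from rfl]

-- A's three-prefix disjunction is exactly B's structural test on the first ten characters
lemma pv_cond_iff (t : List Char) :
    (("boss stone".toList <+: t) ∨ ("boss_stone".toList <+: t) ∨ ("boss-stone".toList <+: t)) ↔
    ((t.take 10).take 4 = "boss".toList ∧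
      PySem.Chars.isIn (((t.take 10).drop 4).take 1) " _-".toList = true ∧
      (t.take 10).drop 5 = "stone".toList) := by
  constructor
  · rintro (h | h | h) <;> rw [List.prefix_iff_eq_take] at h
    · rw [show ("boss stone".toList).length = 10 from rfl] at h; rw [← h]; decide
    · rw [show ("boss_stone".toList).length = 10 from rfl] at h; rw [← h]; decide
    · rw [show ("boss-stone".toList).length = 10 from rfl] at h; rw [← h]; decide
  · rintro ⟨h4, hm, h5⟩
    set h : List Char := t.take 10 with hh
    have hlen10 : h.length = 10 := by
      have h1 : h.length ≤ 10 := by simp [hh]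
      have h2 : (h.drop 5).length = 5 := by rw [h5]; rfl
      simp at h2; omega
    have hdec : h = h.take 4 ++ (h.drop 4).take 1 ++ h.drop 5 := by
      conv_lhs => rw [← List.take_append_drop 4 h]
      rw [List.append_assoc]
      congr 1
      conv_lhs => rw [← List.take_append_drop 1 (h.drop 4)]
      rw [List.drop_drop]
    have hone : ((h.drop 4).take 1).length = 1 := by simp; omega
    obtain ⟨c, hc⟩ : ∃ c, (h.drop 4).take 1 = [c] := by
      rcases heq : (h.drop 4).take 1 with _ | ⟨c, rest⟩
      · rw [heq] at hone; simp at hone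
      · rw [heq] at hone; simp at hone; exact ⟨c, by simp [hone]⟩
    rw [hc] at hdec
    rw [hc, PySem.Chars.isIn_iff_infix, pv_singleton_infix] at hm
    have hpre : h <+: t := by rw [hh]; exact List.take_prefix 10 t
    rw [hdec, h4, h5] at hpre
    fin_cases hm
    · left; exact hpre
    · right; left; exact hpre
    · right; right; exact hpre

-- A's loop, rewritten as one if on B's condition (all three prefixes have length 10)
lemma pv_main (text lowered : List Char) :
    pvLoopA text lowered ["boss stone".toList, "boss_stone".toList, "boss-stone".toList] =
      if ((lowered.take 10).take 4 = "boss".toList ∧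
          PySem.Chars.isIn (((lowered.take 10).drop 4).take 1) " _-".toList = true ∧
          (lowered.take 10).drop 5 = "stone".toList) then
        (if pvLstripSep (text.drop 10) = [] then text else pvLstripSep (text.drop 10))
      else text := by
  have hsA : ∀ p : List Char, p.length = 10 →
      PySem.Chars.slice text (some (PySem.Chars.len p)) none = text.drop 10 := by
    intro p hp
    rw [PySem.Chars.slice_eq_listSlice,
      show PySem.Chars.len p = ((10 : Nat) : Int) from by rw [PySem.Chars.len_eq, hp],
      PySem.List.slice_from _ (by positivity)]
    simp
  have e1 := hsA "boss stone".toList rfl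
  have e2 := hsA "boss_stone".toList rfl
  have e3 := hsA "boss-stone".toList rfl
  have hcond : ((lowered.take 10).take 4 = "boss".toList ∧
      PySem.Chars.isIn (((lowered.take 10).drop 4).take 1) " _-".toList = true ∧
      (lowered.take 10).drop 5 = "stone".toList) ↔
      (PySem.Chars.startswith lowered "boss stone".toList = true ∨
       PySem.Chars.startswith lowered "boss_stone".toList = true ∨
       PySem.Chars.startswith lowered "boss-stone".toList = true) := by
    rw [← pv_cond_iff lowered, PySem.Chars.startswith_iff, PySem.Chars.startswith_iff,
      PySem.Chars.startswith_iff]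
  by_cases hb : ((lowered.take 10).take 4 = "boss".toList ∧
      PySem.Chars.isIn (((lowered.take 10).drop 4).take 1) " _-".toList = true ∧
      (lowered.take 10).drop 5 = "stone".toList)
  · rw [if_pos hb]
    cases hs1 : PySem.Chars.startswith lowered "boss stone".toList <;>
      cases hs2 : PySem.Chars.startswith lowered "boss_stone".toList <;>
        cases hs3 : PySem.Chars.startswith lowered "boss-stone".toList <;>
          try (simp only [pvLoopA, hs1, hs2, hs3, e1, e2, e3, Bool.false_eq_true, if_false, if_true]; done)
    exfalso; rcases hcond.mp hb with h | h | h <;> simp_all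
  · rw [if_neg hb]
    have f1 : PySem.Chars.startswith lowered "boss stone".toList = false := by
      cases hs : PySem.Chars.startswith lowered "boss stone".toList
      · rfl
      · exact absurd (hcond.mpr (Or.inl hs)) hb
    have f2 : PySem.Chars.startswith lowered "boss_stone".toList = false := by
      cases hs : PySem.Chars.startswith lowered "boss_stone".toList
      · rfl
      · exact absurd (hcond.mpr (Or.inr (Or.inl hs))) hb
    have f3 : PySem.Chars.startswith lowered "boss-stone".toList = false := by
      cases hs : PySem.Chars.startswith lowered "boss-stone".toList
      · rfl
      · exact absurd (hcond.mpr (Or.inr (Or.inr hs))) hb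
    simp only [pvLoopA, f1, f2, f3, Bool.false_eq_true, if_false]

-- ===== VERDICT (by name: the statement is the Claim_ definition above) =====
theorem strip_boss_stone_prefix_py_spec : Claim_equal_strip_boss_stone_prefix_py := by
  intro label _
  show strip_boss_stone_prefix_py label = strip_boss_stone_prefix_py_alt label
  unfold strip_boss_stone_prefix_py strip_boss_stone_prefix_py_alt
  by_cases hl : label = ""
  · simp [hl]
  · simp only [hl, if_false, pv_slice_to10, pv_slice_to4, pv_slice45, pv_slice_from5,
      pv_slice_from10, pv_main, apply_ite String.ofList]
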